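-- pv_equiv track=rewrite | github.com/JKrse/nlp_QA_QG_app | windows_setup/functions.py | answer_index
-- ===== SOURCE A (Python) =====
-- def answer_index(answer, context):
--     index_range = []
--     word_len = []
--
--     for word in answer.split():
--         word.lower()
--         idx = context.find(word)
--
--         word_len.append(len(word))
--         index_range.append(idx)
--
--     index_range[-1]+word_len[-1]
--
--     answer_span = [index_range[0], index_range[-1]+word_len[-1]]
--
--     return answer_span
-- ===== SOURCE B (Python) =====
-- def answer_index(answer, context):
--     words = answer.split()
--     return [context.find(words[0]), context.find(words[-1]) + len(words[-1])]
-- ===== Notes on version B (the rewrite author's own statement) =====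
-- stated objective: simpler
-- what changed: B drops A's whole-answer loop and its two accumulator lists (and the dead word.lower()), computing the span directly from the first and last whitespace token; Pre_ excludes empty/whitespace-only answers, on which both raise IndexError.
import Mathlib
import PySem

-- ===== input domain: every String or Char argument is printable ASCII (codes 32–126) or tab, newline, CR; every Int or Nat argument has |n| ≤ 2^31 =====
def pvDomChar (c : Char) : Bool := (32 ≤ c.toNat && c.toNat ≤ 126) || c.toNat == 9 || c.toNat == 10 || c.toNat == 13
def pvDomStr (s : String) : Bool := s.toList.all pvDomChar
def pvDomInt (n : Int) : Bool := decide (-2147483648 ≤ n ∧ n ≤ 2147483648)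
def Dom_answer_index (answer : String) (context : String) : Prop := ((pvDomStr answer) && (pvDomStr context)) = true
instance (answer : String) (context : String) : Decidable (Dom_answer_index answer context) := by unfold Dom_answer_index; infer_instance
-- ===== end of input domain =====

-- B replaces A's loop over all words (two accumulator lists, dead word.lower()) by
-- reading the span directly off the first and last whitespace token (objective: simpler).

-- ===== PORT A =====
def answer_index (answer : String) (context : String) : List Int :=
  -- for word in answer.split(): word.lower() (discarded); append find/len to the two lists
  let st := (PySem.Str.split₀ answer).foldl
    (fun (acc : List Int × List Int) w =>
      (acc.1 ++ [PySem.Str.find context w], acc.2 ++ [PySem.Str.len w]))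
    ([], [])
  -- answer_span = [index_range[0], index_range[-1] + word_len[-1]] (IndexError on empty = none)
  match PySem.List.pyGet? st.1 0, PySem.List.pyGet? st.1 (-1), PySem.List.pyGet? st.2 (-1) with
  | some a0, some al, some wl => [a0, al + wl]
  | _, _, _ => []

-- ===== PORT B =====
def answer_index_alt (answer : String) (context : String) : List Int :=
  match PySem.Str.split₀ answer with
  | [] => []  -- words[0] raises IndexError in Python; outside Pre_
  | w :: ws =>
    let lastw := (w :: ws).getLast (by simp)   -- words[-1]
    [PySem.Str.find context w, PySem.Str.find context lastw + PySem.Str.len lastw]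

-- ===== PRECONDITION & SPEC =====
-- Pre_ excludes exactly the inputs where A raises IndexError: answers with no whitespace tokens.
def Pre_answer_index (answer : String) (context : String) : Prop :=
  PySem.Str.split₀ answer ≠ []
instance (answer : String) (context : String) : Decidable (Pre_answer_index answer context) := by
  unfold Pre_answer_index; infer_instance
def pvWitness_answer_index : String × String := ("big cat", "the big black cat sat")

def Spec_answer_index (answer : String) (context : String) (out : List Int) : Prop := out = answer_index_alt answer context
instance (answer : String) (context : String) (out : List Int) : Decidable (Spec_answer_index answer context out) := by unfold Spec_answer_index; infer_instance

-- ===== CLAIM (what is proved, stated in full; the proofs are below) =====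
def Claim_equal_answer_index : Prop := ∀ (answer : String) (context : String), Dom_answer_index answer context → Pre_answer_index answer context → Spec_answer_index answer context (answer_index answer context)

-- ===== LEMMAS AND PROOFS =====
lemma fold_pair_eq (f g : String → Int) (ws : List String) (xs ys : List Int) :
    ws.foldl (fun (acc : List Int × List Int) w => (acc.1 ++ [f w], acc.2 ++ [g w])) (xs, ys)
      = (xs ++ ws.map f, ys ++ ws.map g) := by
  induction ws generalizing xs ys with
  | nil => simp
  | cons w ws ih => simp [ih]

-- ===== VERDICT (by name: the statement is the Claim_ definition above) =====
theorem answer_index_spec : Claim_equal_answer_index := by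
  intro answer context _hdom hpre
  unfold Spec_answer_index answer_index answer_index_alt
  rcases h : PySem.Str.split₀ answer with _ | ⟨w, ws⟩
  · exact absurd h hpre
  · have hl : ∀ (f : String → Int),
        PySem.List.pyGet? ((w :: ws).map f) (-1) = some (f ((w :: ws).getLast (by simp))) := by
      intro f
      rw [PySem.List.pyGet?_neg_one, List.getLast?_map,
        List.getLast?_eq_some_getLast (by simp : (w :: ws) ≠ [])]
      rfl
    simp only [fold_pair_eq, List.nil_append]
    rw [hl (PySem.Str.find context), hl PySem.Str.len, PySem.List.pyGet?_zero]
    simp
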